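-- pv_equiv track=rewrite | github.com/batistalucasdev/PYTHON | SEMANA 13/MENSAGENS SECRETAS/PASSO.02.03.py | calcular_compatibilidade
-- ===== SOURCE A (Python) =====
-- def calcular_compatibilidade(nome1, nome2):
--     letras_amor = "amor"
--     vogais = "aeiou"
--
--     placar = 0
--
--     for letra in nome1.lower() + nome2.lower():
--         if letra in letras_amor:
--             placar += 10
--         if letra in vogais:
--             placar += 5
--
--     return placar
-- ===== SOURCE B (Python) =====
-- def calcular_compatibilidade(nome1, nome2):
--     # tabulate: frequency table of the combined lowercased string
--     freq = {}
--     for ch in (nome1 + nome2).lower():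
--         freq[ch] = freq.get(ch, 0) + 1
--     # fold over the fixed key sets ('a' and 'o' score in both)
--     return 10 * sum(freq.get(k, 0) for k in "amor") + 5 * sum(freq.get(k, 0) for k in "aeiou")
-- ===== Notes on version B (the rewrite author's own statement) =====
-- stated objective: alternative
-- what changed: Replaces A's per-character membership scan with a build-a-frequency-table pass followed by a weighted sum over the two fixed key strings 'amor' and 'aeiou' (keeping the double scoring of 'a' and 'o').
import Mathlib
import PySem

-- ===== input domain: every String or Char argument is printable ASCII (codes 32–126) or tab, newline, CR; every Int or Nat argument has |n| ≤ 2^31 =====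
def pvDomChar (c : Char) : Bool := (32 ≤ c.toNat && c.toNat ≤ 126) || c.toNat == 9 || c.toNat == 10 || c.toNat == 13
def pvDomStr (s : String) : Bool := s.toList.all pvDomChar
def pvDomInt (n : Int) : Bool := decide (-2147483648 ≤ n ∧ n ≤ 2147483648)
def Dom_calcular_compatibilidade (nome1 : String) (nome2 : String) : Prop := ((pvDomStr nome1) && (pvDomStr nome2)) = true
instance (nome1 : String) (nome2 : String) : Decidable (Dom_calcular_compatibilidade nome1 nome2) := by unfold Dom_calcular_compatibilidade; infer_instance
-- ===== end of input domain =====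

-- B replaces A's per-character membership scan with a frequency table plus a weighted
-- sum over the fixed key strings "amor" and "aeiou" (alternative decomposition, same cost).

-- ===== PORT A =====
def calcular_compatibilidade (nome1 : String) (nome2 : String) : Int :=
  let letras_amor : List Char := ['a', 'm', 'o', 'r']
  let vogais : List Char := ['a', 'e', 'i', 'o', 'u']
  (PySem.Chars.lower nome1.toList ++ PySem.Chars.lower nome2.toList).foldl
    (fun placar letra =>
      let placar := if letra ∈ letras_amor then placar + 10 else placar
      if letra ∈ vogais then placar + 5 else placar) 0

-- ===== PORT B =====
def calcular_compatibilidade_alt (nome1 : String) (nome2 : String) : Int :=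
  let freq : PySem.Dict Char Int :=
    (PySem.Chars.lower (nome1.toList ++ nome2.toList)).foldl
      (fun d ch => d.insert ch (d.getD ch 0 + 1)) PySem.Dict.empty
  10 * ((['a', 'm', 'o', 'r'] : List Char).map (fun k => freq.getD k 0)).sum
    + 5 * ((['a', 'e', 'i', 'o', 'u'] : List Char).map (fun k => freq.getD k 0)).sum

-- ===== PRECONDITION & SPEC =====
def Spec_calcular_compatibilidade (nome1 : String) (nome2 : String) (out : Int) : Prop := out = calcular_compatibilidade_alt nome1 nome2
instance (nome1 : String) (nome2 : String) (out : Int) : Decidable (Spec_calcular_compatibilidade nome1 nome2 out) := by unfold Spec_calcular_compatibilidade; infer_instance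

-- ===== CLAIM (what is proved, stated in full; the proofs are below) =====
def Claim_equal_calcular_compatibilidade : Prop := ∀ (nome1 : String) (nome2 : String), Dom_calcular_compatibilidade nome1 nome2 → Spec_calcular_compatibilidade nome1 nome2 (calcular_compatibilidade nome1 nome2)

-- ===== LEMMAS AND PROOFS =====

-- Per-character weight: membership in "amor"/"aeiou" as a sum of equality indicators.
theorem char_weight (c : Char) :
    (if c ∈ (['a', 'm', 'o', 'r'] : List Char) then (10 : Int) else 0)
      + (if c ∈ (['a', 'e', 'i', 'o', 'u'] : List Char) then (5 : Int) else 0)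
    = 10 * ((if c = 'a' then (1 : Int) else 0) + (if c = 'm' then (1 : Int) else 0)
        + (if c = 'o' then (1 : Int) else 0) + (if c = 'r' then (1 : Int) else 0))
      + 5 * ((if c = 'a' then (1 : Int) else 0) + (if c = 'e' then (1 : Int) else 0)
        + (if c = 'i' then (1 : Int) else 0) + (if c = 'o' then (1 : Int) else 0)
        + (if c = 'u' then (1 : Int) else 0)) := by
  simp only [List.mem_cons, List.not_mem_nil, or_false]
  split_ifs <;> simp_all

-- A's fold, from any accumulator, adds the weighted letter counts of the list.
theorem scoreA_eq (l : List Char) (init : Int) :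
    l.foldl
      (fun placar letra =>
        let placar := if letra ∈ (['a', 'm', 'o', 'r'] : List Char) then placar + 10 else placar
        if letra ∈ (['a', 'e', 'i', 'o', 'u'] : List Char) then placar + 5 else placar) init
    = init
      + 10 * ((l.count 'a' : Int) + l.count 'm' + l.count 'o' + l.count 'r')
      + 5 * ((l.count 'a' : Int) + l.count 'e' + l.count 'i' + l.count 'o' + l.count 'u') := by
  induction l generalizing init with
  | nil => simp
  | cons c t ih =>
    have hstep : (let placar := if c ∈ (['a', 'm', 'o', 'r'] : List Char) then init + 10 else init
        if c ∈ (['a', 'e', 'i', 'o', 'u'] : List Char) then placar + 5 else placar)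
      = init + ((if c ∈ (['a', 'm', 'o', 'r'] : List Char) then (10 : Int) else 0)
          + (if c ∈ (['a', 'e', 'i', 'o', 'u'] : List Char) then (5 : Int) else 0)) := by
      split_ifs <;> ring
    rw [List.foldl_cons, hstep, ih, char_weight c]
    simp only [List.count_cons, beq_iff_eq]
    push_cast
    ring

-- ===== VERDICT (by name: the statement is the Claim_ definition above) =====
theorem calcular_compatibilidade_spec : Claim_equal_calcular_compatibilidade := by
  intro nome1 nome2 _
  unfold Spec_calcular_compatibilidade calcular_compatibilidade calcular_compatibilidade_alt
  simp only [PySem.Dict.foldl_insert_getD_add_one_eq_counter, PySem.Dict.getD_counter,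
    PySem.Chars.lower, List.map_append, List.map, List.sum_cons, List.sum_nil]
  rw [scoreA_eq]
  simp [List.count_append]
  ring
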